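-- pv_equiv track=rewrite | github.com/TenmonAI/tenmon-ark | api/automation/final_master_audit_v1.py | master_verdict
-- ===== SOURCE A (Python) =====
-- from typing import Any, Dict, List, Tuple
--
-- Verdict = str  # completed | partially_completed | blocked | dangerous
--
-- def master_verdict(clusters: List[Dict[str, Any]], readiness: Dict[str, Any]) -> Verdict:
--     if any(c.get("verdict") == "dangerous" for c in clusters):
--         return "dangerous"
--     if any(c.get("verdict") == "blocked" for c in clusters):
--         return "blocked"
--     comp = sum(1 for c in clusters if c.get("verdict") == "completed")
--     part = sum(1 for c in clusters if c.get("verdict") == "partially_completed")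
--     ov = int(readiness.get("overall_master_readiness") or 0)
--     if comp == len(clusters) and ov >= 78:
--         return "completed"
--     if comp + part == len(clusters) and ov >= 55:
--         return "partially_completed"
--     if ov >= 45:
--         return "partially_completed"
--     return "blocked"
-- ===== SOURCE B (Python) =====
-- def master_verdict(clusters, readiness):
--     # Severity lattice: reduce clusters to the single worst severity, then decide.
--     SEVERITY = {"completed": 0, "partially_completed": 1, "blocked": 3, "dangerous": 4}
--     worst = 0
--     for c in clusters:
--         worst = max(worst, SEVERITY.get(c.get("verdict"), 2))
--     ov = int(readiness.get("overall_master_readiness") or 0)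
--     if worst == 4:
--         return "dangerous"
--     if worst == 3:
--         return "blocked"
--     if worst == 0 and ov >= 78:
--         return "completed"
--     if worst <= 1 and ov >= 55:
--         return "partially_completed"
--     if ov >= 45:
--         return "partially_completed"
--     return "blocked"
-- ===== Notes on version B (the rewrite author's own statement) =====
-- stated objective: alternative
-- what changed: Replaces A's four independent scans and count comparisons with a severity-lattice reduction: each cluster verdict is mapped to a numeric rank (completed=0, partial=1, other=2, blocked=3, dangerous=4), one fold takes the maximum rank, and the final verdict is read off that single worst rank plus the readiness value.
import Mathlib
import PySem

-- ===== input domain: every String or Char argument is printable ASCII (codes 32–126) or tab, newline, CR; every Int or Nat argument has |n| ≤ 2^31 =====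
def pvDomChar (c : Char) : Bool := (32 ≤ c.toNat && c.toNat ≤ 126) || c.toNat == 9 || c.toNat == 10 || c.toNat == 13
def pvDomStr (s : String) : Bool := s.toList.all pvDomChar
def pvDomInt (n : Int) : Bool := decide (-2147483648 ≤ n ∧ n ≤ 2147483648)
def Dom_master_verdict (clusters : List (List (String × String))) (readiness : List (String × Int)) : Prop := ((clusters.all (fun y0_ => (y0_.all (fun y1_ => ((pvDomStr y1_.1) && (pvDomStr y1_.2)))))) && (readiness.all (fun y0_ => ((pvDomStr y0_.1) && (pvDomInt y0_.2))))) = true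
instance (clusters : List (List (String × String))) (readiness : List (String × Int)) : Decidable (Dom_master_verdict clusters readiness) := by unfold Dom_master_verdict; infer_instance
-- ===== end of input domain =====

-- B replaces A's presence checks and counts by a severity lattice: one fold reduces the clusters
-- to their single worst severity rank, and the verdict is read off that rank; same result, no speed claim.

-- ===== PORT A =====
def master_verdict (clusters : List (List (String × String))) (readiness : List (String × Int)) : String :=
  if clusters.any (fun c => (PySem.Dict.mk c).get? "verdict" == some "dangerous") then "dangerous"
  else if clusters.any (fun c => (PySem.Dict.mk c).get? "verdict" == some "blocked") then "blocked"
  else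
    let comp : Int := ((clusters.countP (fun c => (PySem.Dict.mk c).get? "verdict" == some "completed") : Nat) : Int)
    let part : Int := ((clusters.countP (fun c => (PySem.Dict.mk c).get? "verdict" == some "partially_completed") : Nat) : Int)
    -- int(readiness.get(...) or 0): the value is already an int, and `v or 0` = v whether or not v = 0
    let ov : Int := match (PySem.Dict.mk readiness).get? "overall_master_readiness" with
      | none => 0
      | some v => if v ≠ 0 then v else 0
    if comp = (clusters.length : Int) ∧ ov ≥ 78 then "completed"
    else if comp + part = (clusters.length : Int) ∧ ov ≥ 55 then "partially_completed"
    else if ov ≥ 45 then "partially_completed"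
    else "blocked"

-- ===== PORT B =====
-- Source B's SEVERITY table, and the per-cluster lookup SEVERITY.get(c.get("verdict"), 2)
def pvSevTable : PySem.Dict String Int :=
  PySem.Dict.mk [("completed", 0), ("partially_completed", 1), ("blocked", 3), ("dangerous", 4)]

def pvSev (c : List (String × String)) : Int :=
  match (PySem.Dict.mk c).get? "verdict" with
  | none => 2
  | some s => pvSevTable.getD s 2

def master_verdict_alt (clusters : List (List (String × String))) (readiness : List (String × Int)) : String :=
  let worst : Int := clusters.foldl (fun w c => max w (pvSev c)) 0
  let ov : Int := match (PySem.Dict.mk readiness).get? "overall_master_readiness" with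
    | none => 0
    | some v => if v ≠ 0 then v else 0
  if worst = 4 then "dangerous"
  else if worst = 3 then "blocked"
  else if worst = 0 ∧ ov ≥ 78 then "completed"
  else if worst ≤ 1 ∧ ov ≥ 55 then "partially_completed"
  else if ov ≥ 45 then "partially_completed"
  else "blocked"

-- ===== PRECONDITION & SPEC =====
def Spec_master_verdict (clusters : List (List (String × String))) (readiness : List (String × Int)) (out : String) : Prop := out = master_verdict_alt clusters readiness
instance (clusters : List (List (String × String))) (readiness : List (String × Int)) (out : String) : Decidable (Spec_master_verdict clusters readiness out) := by unfold Spec_master_verdict; infer_instance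

-- ===== CLAIM =====
def Claim_equal_master_verdict : Prop := ∀ (clusters : List (List (String × String))) (readiness : List (String × Int)), Dom_master_verdict clusters readiness → Spec_master_verdict clusters readiness (master_verdict clusters readiness)

-- ===== LEMMAS AND PROOFS =====

-- the severity rank as a case split on the cluster's verdict
theorem pvSev_eq (c : List (String × String)) : pvSev c =
    (if (PySem.Dict.mk c).get? "verdict" == some "dangerous" then 4
     else if (PySem.Dict.mk c).get? "verdict" == some "blocked" then 3
     else if (PySem.Dict.mk c).get? "verdict" == some "completed" then 0
     else if (PySem.Dict.mk c).get? "verdict" == some "partially_completed" then 1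
     else 2) := by
  cases h : (PySem.Dict.mk c).get? "verdict" with
  | none => simp [pvSev, h]
  | some s =>
    simp only [pvSev, h]
    by_cases h1 : s = "completed"
    · subst h1; simp; decide
    · by_cases h2 : s = "partially_completed"
      · subst h2; simp; decide
      · by_cases h3 : s = "blocked"
        · subst h3; simp; decide
        · by_cases h4 : s = "dangerous"
          · subst h4; simp; decide
          · have e1 : ("completed" == s) = false := beq_eq_false_iff_ne.mpr (Ne.symm h1)
            have e2 : ("partially_completed" == s) = false := beq_eq_false_iff_ne.mpr (Ne.symm h2)
            have e3 : ("blocked" == s) = false := beq_eq_false_iff_ne.mpr (Ne.symm h3)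
            have e4 : ("dangerous" == s) = false := beq_eq_false_iff_ne.mpr (Ne.symm h4)
            simp [pvSevTable, PySem.Dict.getD, PySem.Dict.get?, List.find?, e1, e2, e3, e4, h1, h2, h3, h4]

-- the max-fold is below k exactly when the seed and every severity are
theorem foldl_max_le_iff (l : List (List (String × String))) (a k : Int) :
    l.foldl (fun w c => max w (pvSev c)) a ≤ k ↔ a ≤ k ∧ ∀ c ∈ l, pvSev c ≤ k := by
  induction l generalizing a with
  | nil => simp
  | cons c t ih =>
    simp only [List.foldl_cons, List.mem_cons]
    rw [ih, max_le_iff]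
    constructor
    · rintro ⟨⟨ha, hc⟩, hall⟩
      exact ⟨ha, fun d hd => hd.elim (fun e => e ▸ hc) (hall d)⟩
    · rintro ⟨ha, hall⟩
      exact ⟨⟨ha, hall c (Or.inl rfl)⟩, fun d hd => hall d (Or.inr hd)⟩

-- two disjoint counts fill the list exactly when every element satisfies one of them
theorem count_two_eq_length {A : Type} (p q : A → Bool) (hdis : ∀ a, ¬(p a = true ∧ q a = true)) (l : List A) :
    (l.countP p + l.countP q = l.length) ↔ ∀ a ∈ l, p a = true ∨ q a = true := by
  have hsum : l.countP p + l.countP q = l.countP (fun a => p a || q a) := by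
    induction l with
    | nil => simp
    | cons a t ih =>
      have hd := hdis a
      simp only [List.countP_cons]
      cases hp : p a <;> cases hq : q a <;> simp_all <;> omega
  rw [hsum, List.countP_eq_length]
  constructor
  · intro h a ha
    simpa using h a ha
  · intro h a ha
    simpa using h a ha

-- ===== VERDICT =====
theorem master_verdict_spec : Claim_equal_master_verdict := by
  intro clusters readiness _
  unfold Spec_master_verdict master_verdict master_verdict_alt
  set W := clusters.foldl (fun w c => max w (pvSev c)) 0 with hWdef
  have hWle : ∀ k : Int, W ≤ k ↔ (0 : Int) ≤ k ∧ ∀ c ∈ clusters, pvSev c ≤ k := by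
    intro k; rw [hWdef, foldl_max_le_iff]
  have hub : W ≤ 4 := (hWle 4).mpr ⟨by norm_num, fun c _ => by rw [pvSev_eq]; split_ifs <;> omega⟩
  have hlb : (0 : Int) ≤ W := by
    by_contra h
    have := ((hWle (-1)).mp (by omega)).1
    omega
  by_cases hd : (clusters.any (fun c => (PySem.Dict.mk c).get? "verdict" == some "dangerous")) = true
  · -- some cluster is dangerous → W = 4
    obtain ⟨c, hc, hp⟩ := List.any_eq_true.mp hd
    have hc4 : pvSev c = 4 := by rw [pvSev_eq]; simp [hp]
    have hW4 : W = 4 := by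
      by_contra hne
      have : W ≤ 3 := by omega
      have := ((hWle 3).mp this).2 c hc
      omega
    rw [if_pos hd, if_pos hW4]
  · -- no dangerous cluster → every severity ≤ 3, W ≠ 4
    have hno4 : ∀ c ∈ clusters, pvSev c ≤ 3 := by
      intro c hc
      have hnp : ¬ ((PySem.Dict.mk c).get? "verdict" == some "dangerous") = true := by
        intro hp; exact hd (List.any_eq_true.mpr ⟨c, hc, hp⟩)
      rw [pvSev_eq]; split_ifs with h1 <;> first | exact absurd h1 hnp | omega
    have hWle3 : W ≤ 3 := (hWle 3).mpr ⟨by norm_num, hno4⟩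
    rw [if_neg hd, if_neg (by omega : ¬ W = 4)]
    by_cases hb : (clusters.any (fun c => (PySem.Dict.mk c).get? "verdict" == some "blocked")) = true
    · -- some cluster is blocked → W = 3
      obtain ⟨c, hc, hp⟩ := List.any_eq_true.mp hb
      have hc3 : pvSev c = 3 := by
        rw [pvSev_eq]
        have : ¬ ((PySem.Dict.mk c).get? "verdict" == some "dangerous") = true := by
          simp only [beq_iff_eq] at hp ⊢; simp [hp]
        simp [this, hp]
      have hW3 : W = 3 := by
        by_contra hne
        have : W ≤ 2 := by omega
        have := ((hWle 2).mp this).2 c hc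
        omega
      rw [if_pos hb, if_pos hW3]
    · -- no blocked cluster either → every severity ≤ 2, and the ladder matches
      have hno3 : ∀ c ∈ clusters, pvSev c ≤ 2 := by
        intro c hc
        have hnp : ¬ ((PySem.Dict.mk c).get? "verdict" == some "blocked") = true := by
          intro hp; exact hb (List.any_eq_true.mpr ⟨c, hc, hp⟩)
        have hnd : ¬ ((PySem.Dict.mk c).get? "verdict" == some "dangerous") = true := by
          intro hp; exact hd (List.any_eq_true.mpr ⟨c, hc, hp⟩)
        rw [pvSev_eq]; split_ifs with h1 h2 <;>
          first | exact absurd h1 hnd | exact absurd h2 hnp | omega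
      have hWle2 : W ≤ 2 := (hWle 2).mpr ⟨by norm_num, hno3⟩
      rw [if_neg hb, if_neg (by omega : ¬ W = 3)]
      -- comp = len ↔ W = 0
      have hcomp : (((clusters.countP (fun c => (PySem.Dict.mk c).get? "verdict" == some "completed") : Nat) : Int) = (clusters.length : Int)) ↔ W = 0 := by
        rw [show (((clusters.countP (fun c => (PySem.Dict.mk c).get? "verdict" == some "completed") : Nat) : Int) = (clusters.length : Int)) ↔ clusters.countP (fun c => (PySem.Dict.mk c).get? "verdict" == some "completed") = clusters.length from by omega]
        rw [List.countP_eq_length]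
        constructor
        · intro hall
          have : W ≤ 0 := (hWle 0).mpr ⟨le_refl _, fun c hc => by
            have hv := beq_iff_eq.mp (hall c hc)
            rw [pvSev_eq]; simp [hv]⟩
          omega
        · intro h0 c hc
          have hsle := ((hWle 0).mp (by omega)).2 c hc
          revert hsle
          rw [pvSev_eq]; split_ifs with h1 h2 h3 <;> intro hle <;> first | exact h3 | omega
      -- comp + part = len ↔ W ≤ 1
      have hcp : (((clusters.countP (fun c => (PySem.Dict.mk c).get? "verdict" == some "completed") : Nat) : Int) + ((clusters.countP (fun c => (PySem.Dict.mk c).get? "verdict" == some "partially_completed") : Nat) : Int) = (clusters.length : Int)) ↔ W ≤ 1 := by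
        rw [show (((clusters.countP (fun c => (PySem.Dict.mk c).get? "verdict" == some "completed") : Nat) : Int) + ((clusters.countP (fun c => (PySem.Dict.mk c).get? "verdict" == some "partially_completed") : Nat) : Int) = (clusters.length : Int)) ↔ (clusters.countP (fun c => (PySem.Dict.mk c).get? "verdict" == some "completed") + clusters.countP (fun c => (PySem.Dict.mk c).get? "verdict" == some "partially_completed") = clusters.length) from by omega]
        rw [count_two_eq_length _ _ (fun a => by
          simp only [beq_iff_eq]
          rintro ⟨e1, e2⟩
          rw [e1] at e2
          exact absurd (Option.some.inj e2) (by decide))]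
        constructor
        · intro hall
          exact (hWle 1).mpr ⟨by norm_num, fun c hc => by
            rcases hall c hc with h | h <;> rw [pvSev_eq] <;> simp [beq_iff_eq.mp h]⟩
        · intro h1 c hc
          have hsle := ((hWle 1).mp h1).2 c hc
          revert hsle
          rw [pvSev_eq]; split_ifs with g1 g2 g3 g4 <;> intro hle <;>
            first | exact Or.inl g3 | exact Or.inr g4 | omega
      simp only [hcomp, hcp]
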